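-- pv_equiv track=rewrite | github.com/PlutoCtx/CompetitionsIn2023 | SoftArch/20230523/find_words.py | convert_test_type_to_difficulty_level
-- ===== SOURCE A (Python) =====
-- def convert_test_type_to_difficulty_level(d):
--     """
--     对原本的单词库中的单词进行难度评级
--     :param d: 存储了单词库pickle文件中的单词的字典
--     :return:
--     """
--     result = {}
--     L = list(d.keys())  # in d, we have test types (e.g., CET4,CET6,BBC) for each word
--
--     for k in L:
--         if 'CET4' in d[k]:
--             result[k] = 4  # CET4 word has level 4
--         elif 'OXFORD3000' in d[k]:
--             result[k] = 5
--         elif 'CET6' in d[k] or 'GRADUATE' in d[k]: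
--             result[k] = 6
--         elif 'OXFORD5000' in d[k] or 'IELTS' in d[k]:
--             result[k] = 7
--         elif 'BBC' in d[k]:
--             result[k] = 8
--
--     return result  # {'apple': 4, ...}
-- ===== SOURCE B (Python) =====
-- # B: instead of a per-word elif cascade, invert the mapping: a flat tag->level
-- # dict; a word's level is the MINIMUM level of its recognised tags (correct
-- # because the cascade's priority order coincides with increasing level).
-- TAG_LEVEL = {'CET4': 4, 'OXFORD3000': 5, 'CET6': 6, 'GRADUATE': 6,
--              'OXFORD5000': 7, 'IELTS': 7, 'BBC': 8}
--
--
-- def convert_test_type_to_difficulty_level(d):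
--     result = {}
--     for word, tags in d.items():
--         levels = [TAG_LEVEL[t] for t in tags if t in TAG_LEVEL]
--         if levels:
--             result[word] = min(levels)
--     return result
-- ===== Notes on version B (the rewrite author's own statement) =====
-- stated objective: alternative
-- what changed: Instead of A's five-branch priority cascade (first matching group wins), B inverts the rules into a flat tag->level dictionary and assigns each word the minimum level over its recognised tags; this is equivalent because the cascade's priority order coincides with strictly increasing levels.
import Mathlib
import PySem

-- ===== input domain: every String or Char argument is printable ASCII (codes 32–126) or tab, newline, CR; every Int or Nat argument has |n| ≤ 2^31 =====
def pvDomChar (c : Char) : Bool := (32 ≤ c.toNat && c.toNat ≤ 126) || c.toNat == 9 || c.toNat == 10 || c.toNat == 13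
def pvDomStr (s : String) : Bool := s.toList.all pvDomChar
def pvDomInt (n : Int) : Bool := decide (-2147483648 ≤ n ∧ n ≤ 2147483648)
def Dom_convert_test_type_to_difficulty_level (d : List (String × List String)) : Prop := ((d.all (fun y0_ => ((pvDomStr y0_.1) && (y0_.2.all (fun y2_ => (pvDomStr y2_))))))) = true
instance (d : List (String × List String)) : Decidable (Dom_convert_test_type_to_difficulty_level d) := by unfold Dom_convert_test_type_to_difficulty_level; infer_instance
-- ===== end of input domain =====

-- B inverts A's priority cascade into a flat tag→level dictionary and takes the
-- MINIMUM level over a word's recognised tags (objective: alternative; equivalent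
-- because the cascade's priority order coincides with increasing levels).

-- ===== PORT A =====
def convert_test_type_to_difficulty_level (d : List (String × List String)) : List (String × Int) :=
  let dd := PySem.Dict.ofList d
  let L := dd.keys
  (L.foldl (fun result k =>
      let tags := dd.getD k []
      if tags.contains "CET4" then result.insert k (4 : Int)
      else if tags.contains "OXFORD3000" then result.insert k 5
      else if tags.contains "CET6" || tags.contains "GRADUATE" then result.insert k 6
      else if tags.contains "OXFORD5000" || tags.contains "IELTS" then result.insert k 7
      else if tags.contains "BBC" then result.insert k 8
      else result)
    PySem.Dict.empty).items

-- ===== PORT B =====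
def pvTagLevel : PySem.Dict String Int :=
  PySem.Dict.ofList [("CET4", 4), ("OXFORD3000", 5), ("CET6", 6), ("GRADUATE", 6),
                     ("OXFORD5000", 7), ("IELTS", 7), ("BBC", 8)]

def convert_test_type_to_difficulty_level_alt (d : List (String × List String)) : List (String × Int) :=
  let dd := PySem.Dict.ofList d
  (dd.items.foldl (fun result p =>
      let levels := p.2.filterMap (fun t => pvTagLevel.get? t)
      match PySem.List.min? levels (fun x => x) with
      | some m => result.insert p.1 m
      | none => result)
    PySem.Dict.empty).items

-- ===== PRECONDITION & SPEC =====
def Spec_convert_test_type_to_difficulty_level (d : List (String × List String)) (out : List (String × Int)) : Prop := out = convert_test_type_to_difficulty_level_alt d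
instance (d : List (String × List String)) (out : List (String × Int)) : Decidable (Spec_convert_test_type_to_difficulty_level d out) := by unfold Spec_convert_test_type_to_difficulty_level; infer_instance

-- ===== CLAIM (what is proved, stated in full; the proofs are below) =====
def Claim_equal_convert_test_type_to_difficulty_level : Prop := ∀ (d : List (String × List String)), Dom_convert_test_type_to_difficulty_level d → Spec_convert_test_type_to_difficulty_level d (convert_test_type_to_difficulty_level d)

-- ===== LEMMAS AND PROOFS =====

-- the minimum of a list that contains v and whose every element is ≥ v is v
theorem pv_min_eq (L : List Int) (v : Int) (hv : v ∈ L) (hle : ∀ x ∈ L, v ≤ x) :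
    PySem.List.min? L (fun x => x) = some v := by
  cases h : PySem.List.min? L (fun x => x) with
  | none =>
      rw [PySem.List.min?_eq_none_iff] at h
      simp [h] at hv
  | some m =>
      have hm : m ∈ L := PySem.List.min?_mem h
      have h1 : m ≤ v := PySem.List.min?_isMin h v hv
      have h2 : v ≤ m := hle m hm
      exact congrArg some (le_antisymm h1 h2)

-- pointwise value of the tag→level dictionary
theorem pv_get_eq (t : String) : pvTagLevel.get? t =
    if t = "CET4" then some 4 else if t = "OXFORD3000" then some 5
    else if t = "CET6" then some 6 else if t = "GRADUATE" then some 6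
    else if t = "OXFORD5000" then some 7 else if t = "IELTS" then some 7
    else if t = "BBC" then some 8 else none := by
  have hitems : pvTagLevel.items = [("CET4", 4), ("OXFORD3000", 5), ("CET6", 6), ("GRADUATE", 6),
      ("OXFORD5000", 7), ("IELTS", 7), ("BBC", 8)] := rfl
  simp [PySem.Dict.get?, hitems, List.find?]
  split_ifs <;> simp_all [beq_eq_decide, eq_comm]

-- membership in B's level list, characterised by which tags occur
theorem pv_mem_levels (tags : List String) (x : Int) :
    x ∈ tags.filterMap (fun t => pvTagLevel.get? t) ↔
      (x = 4 ∧ "CET4" ∈ tags) ∨ (x = 5 ∧ "OXFORD3000" ∈ tags) ∨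
      (x = 6 ∧ ("CET6" ∈ tags ∨ "GRADUATE" ∈ tags)) ∨
      (x = 7 ∧ ("OXFORD5000" ∈ tags ∨ "IELTS" ∈ tags)) ∨
      (x = 8 ∧ "BBC" ∈ tags) := by
  rw [List.mem_filterMap]
  constructor
  · rintro ⟨t, ht, hget⟩
    rw [pv_get_eq] at hget
    split_ifs at hget with h1 h2 h3 h4 h5 h6 h7 <;> simp_all
  · rintro (⟨hx, ht⟩ | ⟨hx, ht⟩ | ⟨hx, ht | ht⟩ | ⟨hx, ht | ht⟩ | ⟨hx, ht⟩) <;>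
      subst hx <;> exact ⟨_, ht, rfl⟩

-- per-item agreement between A's cascade and B's minimum-of-levels step
theorem pv_step_agree (tags : List String) (k : String) (acc : PySem.Dict String Int) :
    (if tags.contains "CET4" then acc.insert k (4 : Int)
      else if tags.contains "OXFORD3000" then acc.insert k 5
      else if tags.contains "CET6" || tags.contains "GRADUATE" then acc.insert k 6
      else if tags.contains "OXFORD5000" || tags.contains "IELTS" then acc.insert k 7
      else if tags.contains "BBC" then acc.insert k 8
      else acc)
    = match PySem.List.min? (tags.filterMap (fun t => pvTagLevel.get? t)) (fun x => x) with
      | some m => acc.insert k m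
      | none => acc := by
  simp only [List.contains_eq_mem, decide_eq_true_eq, Bool.or_eq_true]
  split_ifs with h1 h2 h3 h4 h5
  · rw [pv_min_eq _ 4 ((pv_mem_levels tags 4).2 (by tauto))
      (by intro x hx; rcases (pv_mem_levels tags x).1 hx with ⟨h,_⟩|⟨h,_⟩|⟨h,_⟩|⟨h,_⟩|⟨h,_⟩ <;> omega)]
  · rw [pv_min_eq _ 5 ((pv_mem_levels tags 5).2 (by tauto))
      (by intro x hx; rcases (pv_mem_levels tags x).1 hx with ⟨h,hm⟩|⟨h,_⟩|⟨h,_⟩|⟨h,_⟩|⟨h,_⟩ <;> first | omega | exact absurd hm h1)]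
  · rw [pv_min_eq _ 6 ((pv_mem_levels tags 6).2 (by tauto))
      (by intro x hx; rcases (pv_mem_levels tags x).1 hx with ⟨h,hm⟩|⟨h,hm⟩|⟨h,_⟩|⟨h,_⟩|⟨h,_⟩ <;> first | omega | exact absurd hm h1 | exact absurd hm h2)]
  · rw [pv_min_eq _ 7 ((pv_mem_levels tags 7).2 (by tauto))
      (by intro x hx; rcases (pv_mem_levels tags x).1 hx with ⟨h,hm⟩|⟨h,hm⟩|⟨h,hm⟩|⟨h,_⟩|⟨h,_⟩ <;> first | omega | exact absurd hm h1 | exact absurd hm h2 | (exact absurd hm h3))]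
  · rw [pv_min_eq _ 8 ((pv_mem_levels tags 8).2 (by tauto))
      (by intro x hx; rcases (pv_mem_levels tags x).1 hx with ⟨h,hm⟩|⟨h,hm⟩|⟨h,hm⟩|⟨h,hm⟩|⟨h,_⟩ <;> first | omega | exact absurd hm h1 | exact absurd hm h2 | exact absurd hm h3 | exact absurd hm h4)]
  · have : tags.filterMap (fun t => pvTagLevel.get? t) = [] := by
      rw [List.filterMap_eq_nil_iff]
      intro t ht
      rcases em (pvTagLevel.get? t = none) with h | h
      · exact h
      · exfalso
        rcases Option.ne_none_iff_exists'.1 h with ⟨x, hx⟩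
        rcases (pv_mem_levels tags x).1 (List.mem_filterMap.2 ⟨t, ht, hx⟩) with
          ⟨_,hm⟩|⟨_,hm⟩|⟨_,hm⟩|⟨_,hm⟩|⟨_,hm⟩ <;> tauto
    rw [this]
    simp [PySem.List.min?]

-- ===== VERDICT (by name: the statement is the Claim_ definition above) =====
theorem convert_test_type_to_difficulty_level_spec : Claim_equal_convert_test_type_to_difficulty_level := by
  intro d _
  unfold Spec_convert_test_type_to_difficulty_level
  unfold convert_test_type_to_difficulty_level convert_test_type_to_difficulty_level_alt
  simp only []
  set dd := PySem.Dict.ofList d with hdd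
  have hnd : dd.keys.Nodup := PySem.Dict.nodup_keys_ofList d
  have hkeys : dd.keys = dd.items.map (·.1) := rfl
  rw [hkeys, List.foldl_map]
  congr 1
  apply PySem.List.foldl_congr_mem'
  intro p hp acc
  have hget : dd.getD p.1 [] = p.2 :=
    PySem.Dict.getD_of_mem_items (d := dd) (k := p.1) (v := p.2) (d0 := []) (by simpa using hp) hnd
  simp only [hget]
  exact pv_step_agree p.2 p.1 acc
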